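-- pv_equiv track=rewrite | github.com/nhuthangl24/Tool-Filter | txt_target_filter_ui.py | choose_username_field
-- ===== SOURCE A (Python) =====
-- def choose_username_field(inputs: list[dict[str, object]]) -> str | None:
--     preferred_names = ("username", "user", "email", "login", "userid")
--     for field_name in preferred_names:
--         for item in inputs:
--             item_name = str(item.get("name", "")).strip().lower()
--             item_type = str(item.get("type", "")).strip().lower()
--             if item_name == field_name and item_type in {"text", "email", ""}:
--                 return str(item.get("name", ""))
--
--     for item in inputs:
--         item_type = str(item.get("type", "")).strip().lower()
--         if item_type in {"text", "email", ""} and str(item.get("name", "")).strip():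
--             return str(item.get("name", ""))
--     return None
-- ===== SOURCE B (Python) =====
-- def choose_username_field(inputs: list[dict[str, object]]) -> str | None:
--     preferred_names = ("username", "user", "email", "login", "userid")
--     by_name = {}
--     fallback = None
--     for item in inputs:
--         raw = str(item.get("name", ""))
--         item_type = str(item.get("type", "")).strip().lower()
--         if item_type in {"text", "email", ""}:
--             key = raw.strip().lower()
--             if key not in by_name:
--                 by_name[key] = raw
--             if fallback is None and raw.strip():
--                 fallback = raw
--     for name in preferred_names:
--         if name in by_name:
--             return by_name[name]
--     return fallback
-- ===== Notes on version B (the rewrite author's own statement) =====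
-- stated objective: alternative
-- what changed: Replaces A's five full scans of inputs (one per preferred name) plus a separate fallback scan with a single pass that builds a dict from normalized name to first-seen raw name and records the fallback, then one loop over the five preferred names.
import Mathlib
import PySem

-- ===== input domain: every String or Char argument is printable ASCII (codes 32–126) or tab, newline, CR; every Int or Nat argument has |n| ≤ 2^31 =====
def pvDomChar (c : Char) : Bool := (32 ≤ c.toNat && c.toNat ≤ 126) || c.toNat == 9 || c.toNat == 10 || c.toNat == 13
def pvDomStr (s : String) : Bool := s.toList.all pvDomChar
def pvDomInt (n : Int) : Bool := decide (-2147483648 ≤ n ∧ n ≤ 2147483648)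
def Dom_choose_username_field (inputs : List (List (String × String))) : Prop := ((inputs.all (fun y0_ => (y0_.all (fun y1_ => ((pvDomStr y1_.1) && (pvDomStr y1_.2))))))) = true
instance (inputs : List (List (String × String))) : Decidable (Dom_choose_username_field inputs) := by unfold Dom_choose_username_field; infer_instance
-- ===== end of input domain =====

-- B replaces A's repeated scans of inputs (one per preferred name, plus a fallback scan)
-- with a single pass building a dict keyed by normalized name; equal return value proved below.

-- ===== PORT A =====
-- str(item.get("name","")).strip().lower()
def pvNorm (s : String) : String := PySem.Str.lower (PySem.Str.strip s)

def pvQual (t : String) : Bool := t == "text" || t == "email" || t == ""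

-- inner 'for item in inputs' of A's first loop, for a fixed field_name (early return = some)
def pvAInner (field_name : String) : List (List (String × String)) → Option String
  | [] => none
  | item :: rest =>
    let raw := PySem.Dict.getD (PySem.Dict.mk item) "name" ""
    let item_name := pvNorm raw
    let item_type := pvNorm (PySem.Dict.getD (PySem.Dict.mk item) "type" "")
    if item_name == field_name && pvQual item_type then some raw
    else pvAInner field_name rest

-- outer 'for field_name in preferred_names'
def pvAOuter (inputs : List (List (String × String))) : List String → Option String
  | [] => none
  | n :: ns =>
    match pvAInner n inputs with
    | some r => some r
    | none => pvAOuter inputs ns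

-- A's second loop (fallback)
def pvAFallback : List (List (String × String)) → Option String
  | [] => none
  | item :: rest =>
    let item_type := pvNorm (PySem.Dict.getD (PySem.Dict.mk item) "type" "")
    if pvQual item_type && (PySem.Str.strip (PySem.Dict.getD (PySem.Dict.mk item) "name" "") != "") then
      some (PySem.Dict.getD (PySem.Dict.mk item) "name" "")
    else pvAFallback rest

def choose_username_field (inputs : List (List (String × String))) : Option String :=
  match pvAOuter inputs ["username", "user", "email", "login", "userid"] with
  | some r => some r
  | none => pvAFallback inputs

-- ===== PORT B =====
-- one fold step of B's single pass: state = (by_name dict, fallback)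
def pvBStep (st : PySem.Dict String String × Option String) (item : List (String × String)) :
    PySem.Dict String String × Option String :=
  let raw := PySem.Dict.getD (PySem.Dict.mk item) "name" ""
  let item_type := pvNorm (PySem.Dict.getD (PySem.Dict.mk item) "type" "")
  if pvQual item_type then
    let key := pvNorm raw
    let d' := if (st.1.contains key) then st.1 else st.1.insert key raw
    let fb' := if st.2 == none && (PySem.Str.strip raw != "") then some raw else st.2
    (d', fb')
  else st

-- B's second loop: first preferred name present in the dict, else the fallback
def pvBPick (d : PySem.Dict String String) (fb : Option String) : List String → Option String
  | [] => fb
  | n :: ns =>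
    match d.get? n with
    | some v => some v
    | none => pvBPick d fb ns

def choose_username_field_alt (inputs : List (List (String × String))) : Option String :=
  let st := inputs.foldl pvBStep (PySem.Dict.empty, none)
  pvBPick st.1 st.2 ["username", "user", "email", "login", "userid"]

-- ===== PRECONDITION & SPEC =====
def Spec_choose_username_field (inputs : List (List (String × String))) (out : Option String) : Prop := out = choose_username_field_alt inputs
instance (inputs : List (List (String × String))) (out : Option String) : Decidable (Spec_choose_username_field inputs out) := by unfold Spec_choose_username_field; infer_instance

-- ===== CLAIM (what is proved, stated in full; the proofs are below) =====
def Claim_equal_choose_username_field : Prop := ∀ (inputs : List (List (String × String))), Dom_choose_username_field inputs → Spec_choose_username_field inputs (choose_username_field inputs)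

-- ===== LEMMAS AND PROOFS =====

-- the dict component of B's pass answers lookups exactly as A's inner scan, seeded by the start dict
theorem pvB_fst_get (items : List (List (String × String)))
    (d : PySem.Dict String String) (fb : Option String) (n : String) :
    (items.foldl pvBStep (d, fb)).1.get? n =
      ((d.get? n).orElse (fun _ => pvAInner n items)) := by
  induction items generalizing d fb with
  | nil => cases h : d.get? n <;> simp [pvAInner, Option.orElse, h]
  | cons item rest ih =>
    simp only [List.foldl_cons, pvAInner, pvBStep]
    by_cases hq : pvQual (pvNorm (PySem.Dict.getD (PySem.Dict.mk item) "type" "")) = true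
    · rw [if_pos hq]
      rw [ih]
      by_cases hn : pvNorm (PySem.Dict.getD (PySem.Dict.mk item) "name" "") = n
      · by_cases hc : d.contains (pvNorm (PySem.Dict.getD (PySem.Dict.mk item) "name" "")) = true
        · rw [if_pos hc]
          cases hdg : d.get? n with
          | none =>
            rw [hn] at hc
            rw [PySem.Dict.get?_eq_none_iff_contains] at hdg
            simp [hc] at hdg
          | some v => simp [Option.orElse]
        · rw [if_neg hc]
          have hdn : d.get? n = none := by
            rw [← hn]
            rw [PySem.Dict.get?_eq_none_iff_contains]
            simpa using hc
          rw [hn, PySem.Dict.get?_insert_self, hdn]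
          simp [hq, Option.orElse]
      · have hins : ∀ v, (d.insert (pvNorm (PySem.Dict.getD (PySem.Dict.mk item) "name" "")) v).get? n = d.get? n := by
          intro v
          exact PySem.Dict.get?_insert_of_ne _ _ (fun h => hn (Eq.symm h))
        have hkey : (pvNorm (PySem.Dict.getD (PySem.Dict.mk item) "name" "") == n && pvQual (pvNorm (PySem.Dict.getD (PySem.Dict.mk item) "type" ""))) = false := by
          simp [hn]
        rw [hkey]
        split_ifs <;> simp_all [Option.orElse]
    · rw [if_neg hq]
      rw [ih]
      have : (pvNorm (PySem.Dict.getD (PySem.Dict.mk item) "name" "") == n && pvQual (pvNorm (PySem.Dict.getD (PySem.Dict.mk item) "type" ""))) = false := by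
        simp [Bool.not_eq_true] at hq; simp [hq]
      rw [this]
      simp

-- the fallback component of B's pass is A's fallback scan, seeded by the start fallback
theorem pvB_snd (items : List (List (String × String)))
    (d : PySem.Dict String String) (fb : Option String) :
    (items.foldl pvBStep (d, fb)).2 = (fb.orElse (fun _ => pvAFallback items)) := by
  induction items generalizing d fb with
  | nil => cases fb <;> simp [pvAFallback, Option.orElse]
  | cons item rest ih =>
    simp only [List.foldl_cons, pvAFallback, pvBStep]
    by_cases hq : pvQual (pvNorm (PySem.Dict.getD (PySem.Dict.mk item) "type" "")) = true
    · rw [if_pos hq]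
      rw [ih]
      by_cases hs : (PySem.Str.strip (PySem.Dict.getD (PySem.Dict.mk item) "name" "") != "") = true
      · cases fb with
        | none => simp [hs, hq, Option.orElse]
        | some v => simp [Option.orElse]
      · cases fb with
        | none =>
          simp only [Bool.not_eq_true] at hs
          simp [hs, hq, Option.orElse]
        | some v => simp [Option.orElse]
    · rw [if_neg hq]
      rw [ih]
      have hof : (pvQual (pvNorm (PySem.Dict.getD (PySem.Dict.mk item) "type" "")) &&
          (PySem.Str.strip (PySem.Dict.getD (PySem.Dict.mk item) "name" "") != "")) = false := by
        simp [Bool.not_eq_true] at hq; simp [hq]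
      rw [hof]
      simp

-- pick over names = A's outer loop with the fallback appended, given get? matches pvAInner
theorem pvBPick_eq (inputs : List (List (String × String)))
    (d : PySem.Dict String String) (fb : Option String)
    (hget : ∀ n, d.get? n = pvAInner n inputs)
    (names : List String) :
    pvBPick d fb names =
      (match pvAOuter inputs names with
       | some r => some r
       | none => fb) := by
  induction names with
  | nil => simp [pvBPick, pvAOuter]
  | cons n ns ih =>
    simp only [pvBPick, pvAOuter, hget n]
    cases pvAInner n inputs with
    | some r => rfl
    | none => exact ih

-- ===== VERDICT (by name: the statement is the Claim_ definition above) =====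
theorem choose_username_field_spec : Claim_equal_choose_username_field := by
  intro inputs _
  unfold Spec_choose_username_field choose_username_field choose_username_field_alt
  have hget : ∀ n, (inputs.foldl pvBStep (PySem.Dict.empty, none)).1.get? n = pvAInner n inputs := by
    intro n
    rw [pvB_fst_get]
    simp [Option.orElse]
  have hfb : (inputs.foldl pvBStep (PySem.Dict.empty, none)).2 = pvAFallback inputs := by
    rw [pvB_snd]; simp [Option.orElse]
  rw [pvBPick_eq inputs _ _ hget]
  rw [hfb]
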